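-- pv_equiv track=rewrite | github.com/anujkhare/algorithms | solutions/Greedy/Bulbs.py | bulbs
-- ===== SOURCE A (Python) =====
-- def bulbs(A):
--     l = len(A)
--     if l == 0:
--         return 0
--     flips = 0
--     for s in A:
--         if (flips + s) % 2 == 1:
--             continue
--         flips += 1
--     return flips
-- ===== SOURCE B (Python) =====
-- def bulbs(A):
--     # Two stages: map to parities, then count parity transitions by divide and conquer
--     # over index ranges; add 1 if the first bulb starts off.
--     P = [x % 2 for x in A]
--
--     def trans(lo, hi):
--         if hi - lo < 2:
--             return 0
--         mid = (lo + hi) // 2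
--         return trans(lo, mid) + trans(mid, hi) + (1 if P[mid - 1] != P[mid] else 0)
--
--     first = 1 if P and P[0] == 0 else 0
--     return first + trans(0, len(P))
-- ===== Notes on version B (the rewrite author's own statement) =====
-- stated objective: alternative
-- what changed: B first maps the list to parities, then counts parity transitions by divide-and-conquer recursion over index ranges (plus a check of the first bulb), instead of A's single left-to-right pass threading a flip-parity accumulator.
import Mathlib
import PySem

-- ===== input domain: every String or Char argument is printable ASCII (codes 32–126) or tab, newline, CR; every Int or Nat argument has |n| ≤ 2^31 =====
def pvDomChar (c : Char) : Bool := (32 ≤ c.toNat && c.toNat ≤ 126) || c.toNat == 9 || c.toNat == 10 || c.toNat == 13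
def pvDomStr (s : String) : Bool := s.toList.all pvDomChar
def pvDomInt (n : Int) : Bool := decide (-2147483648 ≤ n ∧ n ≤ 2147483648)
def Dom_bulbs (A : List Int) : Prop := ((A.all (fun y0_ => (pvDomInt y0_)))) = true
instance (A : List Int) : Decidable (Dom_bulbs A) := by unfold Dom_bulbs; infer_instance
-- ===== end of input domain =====

-- B maps the list to parities, then counts parity transitions by divide-and-conquer over
-- index ranges, instead of A's single pass with a flip-parity accumulator ("alternative").

-- ===== PORT A =====
def bulbsLoop : List Int → Int → Int
  | [], flips => flips
  | s :: rest, flips =>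
      if PySem.Int.mod (flips + s) 2 == 1 then bulbsLoop rest flips
      else bulbsLoop rest (flips + 1)

def bulbs (A : List Int) : Int :=
  if A.length = 0 then 0 else bulbsLoop A 0

-- ===== PORT B =====
-- P = [x % 2 for x in A]
def pvParities (A : List Int) : List Int := A.map (fun x => PySem.Int.mod x 2)

-- inner recursive 'trans(lo, hi)'; Python's mid = (lo+hi)//2 is written out inline;
-- the indices P[mid-1], P[mid] are always in range at the call sites
-- (0 ≤ lo < mid < hi ≤ len P), so List.getD is exact there.
def transLoop (P : List Int) (lo hi : Nat) : Int :=
  if hi - lo < 2 then 0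
  else
    transLoop P lo ((lo + hi) / 2) + transLoop P ((lo + hi) / 2) hi +
      (if P.getD ((lo + hi) / 2 - 1) 0 ≠ P.getD ((lo + hi) / 2) 0 then 1 else 0)
termination_by hi - lo
decreasing_by all_goals omega

def bulbs_alt (A : List Int) : Int :=
  let P := pvParities A
  let first : Int := match P with
    | [] => 0
    | p :: _ => if p == 0 then 1 else 0
  first + transLoop P 0 P.length

-- ===== PRECONDITION & SPEC =====
def Spec_bulbs (A : List Int) (out : Int) : Prop := out = bulbs_alt A
instance (A : List Int) (out : Int) : Decidable (Spec_bulbs A out) := by unfold Spec_bulbs; infer_instance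

-- ===== CLAIM (what is proved, stated in full; the proofs are below) =====
def Claim_equal_bulbs : Prop := ∀ (A : List Int), Dom_bulbs A → Spec_bulbs A (bulbs A)

-- ===== LEMMAS AND PROOFS =====

-- number of adjacent unequal pairs
def pvAdj : List Int → Int
  | a :: b :: t => (if a ≠ b then (1:Int) else 0) + pvAdj (b :: t)
  | _ => 0

-- transitions relative to a running previous value
def pvG : Int → List Int → Int
  | _, [] => 0
  | prev, p :: t => (if p ≠ prev then (1:Int) else 0) + pvG p t

theorem pvG_eq_adj (t : List Int) (a : Int) : pvG a t = pvAdj (a :: t) := by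
  induction t generalizing a with
  | nil => rfl
  | cons b t ih => simp only [pvG, pvAdj, ih b, ne_comm]

theorem pvAdj_short (l : List Int) (h : l.length ≤ 1) : pvAdj l = 0 := by
  match l, h with
  | [], _ => rfl
  | [_], _ => rfl

theorem pvAdj_split (xs ys : List Int) (x y : Int) :
    pvAdj ((xs ++ [x]) ++ y :: ys) = pvAdj (xs ++ [x]) + (if x ≠ y then 1 else 0) + pvAdj (y :: ys) := by
  induction xs with
  | nil => simp [pvAdj]; try ring
  | cons a xs ih =>
      cases xs with
      | nil => simp [pvAdj]; try ring
      | cons b xs =>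
          simp only [List.cons_append, pvAdj] at ih ⊢
          rw [ih]; ring

theorem take_one_drop (P : List Int) (i : Nat) (h : i < P.length) :
    (P.drop i).take 1 = [P[i]] := by
  rw [List.drop_eq_getElem_cons h, List.take_succ_cons, List.take_zero]

theorem take_succ_drop (P : List Int) (i k : Nat) (h : i < P.length) :
    (P.drop i).take (k + 1) = P[i] :: (P.drop (i + 1)).take k := by
  rw [List.drop_eq_getElem_cons h, List.take_succ_cons]

theorem transLoop_eq (P : List Int) (n lo hi : Nat) (hn : hi - lo ≤ n)
    (h1 : lo ≤ hi) (h2 : hi ≤ P.length) :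
    transLoop P lo hi = pvAdj ((P.drop lo).take (hi - lo)) := by
  induction n generalizing lo hi with
  | zero =>
      rw [transLoop, if_pos (by omega), pvAdj_short _ (by simp; omega)]
  | succ n ih =>
      rw [transLoop]
      by_cases hs : hi - lo < 2
      · rw [if_pos hs, pvAdj_short _ (by simp; omega)]
      · rw [if_neg hs]
        set mid := (lo + hi) / 2 with hmid
        have hmid1 : lo < mid := by omega
        have hmid2 : mid < hi := by omega
        have hm1 : mid - 1 < P.length := by omega
        have hm2 : mid < P.length := by omega
        have e2 : (P.drop lo).take (mid - lo)
            = (P.drop lo).take (mid - 1 - lo) ++ [P[mid - 1]] := by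
          rw [show mid - lo = (mid - 1 - lo) + 1 by omega, List.take_add, List.drop_drop,
            show lo + (mid - 1 - lo) = mid - 1 by omega, take_one_drop P _ hm1]
        have e3 : (P.drop mid).take (hi - mid)
            = P[mid] :: (P.drop (mid + 1)).take (hi - mid - 1) := by
          rw [show hi - mid = (hi - mid - 1) + 1 by omega, take_succ_drop P _ _ hm2]
          congr 2
        have hseg : (P.drop lo).take (hi - lo)
            = (((P.drop lo).take (mid - 1 - lo) ++ [P[mid - 1]]) ++ P[mid] :: (P.drop (mid + 1)).take (hi - mid - 1)) := by
          rw [show hi - lo = (mid - lo) + (hi - mid) by omega, List.take_add, List.drop_drop,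
            show lo + (mid - lo) = mid by omega, e2, e3]
        rw [hseg, pvAdj_split,
          ih lo mid (by omega) (by omega) (by omega),
          ih mid hi (by omega) (by omega) h2,
          e2, e3, List.getD_eq_getElem _ _ hm1, List.getD_eq_getElem _ _ hm2]
        ring

theorem mod_two (x : Int) : PySem.Int.mod x 2 = x % 2 :=
  PySem.Int.mod_eq_emod_of_pos (by norm_num)

theorem bulbsLoop_eq (l : List Int) (flips : Int) :
    bulbsLoop l flips = flips + pvG ((flips + 1) % 2) (pvParities l) := by
  induction l generalizing flips with
  | nil => simp [bulbsLoop, pvG, pvParities]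
  | cons s rest ih =>
      simp only [bulbsLoop, pvParities, List.map_cons, pvG, mod_two]
      have h0 : s % 2 = 0 ∨ s % 2 = 1 := by omega
      by_cases h : (flips + s) % 2 = 1
      · rw [if_pos (by simpa using h)]
        have hp : s % 2 = (flips + 1) % 2 := by omega
        rw [if_neg (by rw [hp]; simp), ih flips, hp]
        simp [pvParities]
      · rw [if_neg (by simpa using h)]
        have hp : s % 2 ≠ (flips + 1) % 2 := by omega
        rw [if_pos hp, ih (flips + 1),
          show (flips + 1 + 1) % 2 = s % 2 by omega]
        simp [pvParities]; ring

theorem transLoop_nil : transLoop [] 0 0 = 0 := by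
  rw [transLoop]; norm_num

-- ===== VERDICT (by name: the statement is the Claim_ definition above) =====
theorem bulbs_spec : Claim_equal_bulbs := by
  intro A _
  unfold Spec_bulbs bulbs bulbs_alt
  cases A with
  | nil => simp [pvParities, transLoop_nil]
  | cons s rest =>
      simp only [List.length_cons, if_neg (by omega : ¬ (rest.length + 1 = 0))]
      rw [bulbsLoop_eq]
      have hlen : (pvParities (s :: rest)).length = rest.length + 1 := by
        simp [pvParities]
      rw [transLoop_eq (pvParities (s :: rest)) (rest.length + 1) 0 (pvParities (s :: rest)).length
        (by omega) (by omega) (by omega)]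
      simp only [List.drop_zero, Nat.sub_zero, List.take_length]
      rw [show (0 : Int) + 1 = 1 by ring, show (1 : Int) % 2 = 1 from rfl, pvG_eq_adj]
      simp only [pvParities, List.map_cons, pvAdj, mod_two]
      have h0 : s % 2 = 0 ∨ s % 2 = 1 := by omega
      rcases h0 with h0 | h0 <;> simp [h0]
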